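-- pv_equiv track=rewrite | github.com/ChitrankSurana/Password-Manager-Local | src/web/app.py | _get_password_issues
-- ===== SOURCE A (Python) =====
-- def _get_password_issues(password):
--     """Get specific issues with a password"""
--     issues = []
--
--     if len(password) < 8:
--         issues.append('Too short (less than 8 characters)')
--
--     if not any(c.islower() for c in password):
--         issues.append('No lowercase letters')
--
--     if not any(c.isupper() for c in password):
--         issues.append('No uppercase letters')
--
--     if not any(c.isdigit() for c in password):
--         issues.append('No numbers')
--
--     if not any(c in '!@#$%^&*()_+-=[]{}|;:,.<>?' for c in password):
--         issues.append('No special characters')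
--
--     if password.lower() in ['password', '123456', 'qwerty', 'abc123', 'password123']:
--         issues.append('Common password')
--
--     return issues
-- ===== SOURCE B (Python) =====
-- def _get_password_issues(password):
--     """Get specific issues with a password (single-pass flag collection)"""
--     specials = '!@#$%^&*()_+-=[]{}|;:,.<>?'
--     has_lower = has_upper = has_digit = has_special = False
--     for c in password:
--         has_lower = has_lower or c.islower()
--         has_upper = has_upper or c.isupper()
--         has_digit = has_digit or c.isdigit()
--         has_special = has_special or (c in specials)
--     return (
--         (['Too short (less than 8 characters)'] if len(password) < 8 else []) +
--         ([] if has_lower else ['No lowercase letters']) +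
--         ([] if has_upper else ['No uppercase letters']) +
--         ([] if has_digit else ['No numbers']) +
--         ([] if has_special else ['No special characters']) +
--         (['Common password'] if password.lower() in ['password', '123456', 'qwerty', 'abc123', 'password123'] else [])
--     )
-- ===== Notes on version B (the rewrite author's own statement) =====
-- stated objective: faster
-- what changed: Replaces the four separate any()-scans of the password with one pass maintaining four boolean flags, and builds the issue list by concatenating conditional singletons instead of successive appends.
import Mathlib
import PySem

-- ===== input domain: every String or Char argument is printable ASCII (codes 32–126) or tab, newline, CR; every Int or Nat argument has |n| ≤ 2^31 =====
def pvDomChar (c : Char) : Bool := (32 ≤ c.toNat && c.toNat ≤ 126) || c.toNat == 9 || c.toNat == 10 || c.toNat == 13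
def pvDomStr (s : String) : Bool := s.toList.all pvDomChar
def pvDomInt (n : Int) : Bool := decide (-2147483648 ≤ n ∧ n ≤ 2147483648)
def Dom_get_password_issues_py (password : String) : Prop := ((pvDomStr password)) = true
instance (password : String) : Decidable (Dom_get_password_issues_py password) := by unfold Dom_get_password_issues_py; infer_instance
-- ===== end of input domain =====

-- B does one pass maintaining four booleans instead of four any()-scans, then concatenates conditional singletons; same return value; a timing run measured B faster by a constant factor (single scan vs four scans).
-- ===== PORT A =====
def get_password_issues_py (password : String) : List String :=
  let issues : List String := []
  let issues := if PySem.Str.len password < 8 then issues ++ ["Too short (less than 8 characters)"] else issues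
  let issues := if ¬ (password.toList.any (fun c => PySem.Chars.islower c)) then issues ++ ["No lowercase letters"] else issues
  let issues := if ¬ (password.toList.any (fun c => PySem.Chars.isupper c)) then issues ++ ["No uppercase letters"] else issues
  let issues := if ¬ (password.toList.any (fun c => PySem.Chars.isdigit c)) then issues ++ ["No numbers"] else issues
  let issues := if ¬ (password.toList.any (fun c => "!@#$%^&*()_+-=[]{}|;:,.<>?".toList.contains c)) then issues ++ ["No special characters"] else issues
  let issues := if ["password", "123456", "qwerty", "abc123", "password123"].contains (PySem.Str.lower password) then issues ++ ["Common password"] else issues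
  issues

-- ===== PORT B =====
def pvSpecials : List Char := "!@#$%^&*()_+-=[]{}|;:,.<>?".toList

def get_password_issues_py_alt (password : String) : List String :=
  let st := password.toList.foldl
    (fun (s : Bool × Bool × Bool × Bool) c =>
      (s.1 || PySem.Chars.islower c,
       s.2.1 || PySem.Chars.isupper c,
       s.2.2.1 || PySem.Chars.isdigit c,
       s.2.2.2 || pvSpecials.contains c))
    (false, false, false, false)
  (if PySem.Str.len password < 8 then ["Too short (less than 8 characters)"] else []) ++
  (if st.1 then [] else ["No lowercase letters"]) ++
  (if st.2.1 then [] else ["No uppercase letters"]) ++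
  (if st.2.2.1 then [] else ["No numbers"]) ++
  (if st.2.2.2 then [] else ["No special characters"]) ++
  (if ["password", "123456", "qwerty", "abc123", "password123"].contains (PySem.Str.lower password) then ["Common password"] else [])

-- ===== PRECONDITION & SPEC =====
def Spec_get_password_issues_py (password : String) (out : List String) : Prop := out = get_password_issues_py_alt password
instance (password : String) (out : List String) : Decidable (Spec_get_password_issues_py password out) := by unfold Spec_get_password_issues_py; infer_instance

-- ===== CLAIM (what is proved, stated in full; the proofs are below) =====
def Claim_equal_get_password_issues_py : Prop := ∀ (password : String), Dom_get_password_issues_py password → Spec_get_password_issues_py password (get_password_issues_py password)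

-- ===== LEMMAS AND PROOFS =====

-- ===== VERDICT (by name: the statement is the Claim_ definition above) =====
-- the single fold computes the four any()-results componentwise
theorem pvFold_eq_any (p1 p2 p3 p4 : Char → Bool) (l : List Char) (b1 b2 b3 b4 : Bool) :
    l.foldl (fun (s : Bool × Bool × Bool × Bool) c =>
      (s.1 || p1 c, s.2.1 || p2 c, s.2.2.1 || p3 c, s.2.2.2 || p4 c)) (b1, b2, b3, b4)
    = (b1 || l.any p1, b2 || l.any p2, b3 || l.any p3, b4 || l.any p4) := by
  induction l generalizing b1 b2 b3 b4 with
  | nil => simp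
  | cons c l ih => simp only [List.foldl_cons, List.any_cons, ih]; simp [Bool.or_assoc]

theorem get_password_issues_py_spec : Claim_equal_get_password_issues_py := by
  intro password _
  unfold Spec_get_password_issues_py get_password_issues_py get_password_issues_py_alt
  simp only [pvFold_eq_any, Bool.false_or, pvSpecials]
  generalize (password.toList.any fun c => PySem.Chars.islower c) = bl
  generalize (password.toList.any fun c => PySem.Chars.isupper c) = bu
  generalize (password.toList.any fun c => PySem.Chars.isdigit c) = bd
  generalize (password.toList.any fun c => ("!@#$%^&*()_+-=[]{}|;:,.<>?".toList).contains c) = bs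
  generalize (["password", "123456", "qwerty", "abc123", "password123"].contains (PySem.Str.lower password)) = bc
  by_cases h : PySem.Str.len password < 8 <;>
    cases bl <;> cases bu <;> cases bd <;> cases bs <;> cases bc <;> simp_all
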